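-- pv_equiv track=rewrite | github.com/a-brandon/practice | edabit/boxes.py | box_seq
-- ===== SOURCE A (Python) =====
-- def box_seq(step):
--     box = 0
--     cycle = 0
--     while cycle < step:
--         box += 3
--         cycle += 1
--         if cycle == step:
--             break
--         box -= 1
--         cycle += 1
--         if cycle == step:
--             break
--     return box
-- ===== SOURCE B (Python) =====
-- def box_seq(step):
--     if step <= 0:
--         return 0
--     return step if step % 2 == 0 else step + 2
-- ===== Notes on version B (the rewrite author's own statement) =====
-- stated objective: faster
-- what changed: Replaced the O(step) while-loop (alternating +3/-1 with break checks) by a constant-time closed-form formula depending only on the sign and parity of step.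
import Mathlib
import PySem

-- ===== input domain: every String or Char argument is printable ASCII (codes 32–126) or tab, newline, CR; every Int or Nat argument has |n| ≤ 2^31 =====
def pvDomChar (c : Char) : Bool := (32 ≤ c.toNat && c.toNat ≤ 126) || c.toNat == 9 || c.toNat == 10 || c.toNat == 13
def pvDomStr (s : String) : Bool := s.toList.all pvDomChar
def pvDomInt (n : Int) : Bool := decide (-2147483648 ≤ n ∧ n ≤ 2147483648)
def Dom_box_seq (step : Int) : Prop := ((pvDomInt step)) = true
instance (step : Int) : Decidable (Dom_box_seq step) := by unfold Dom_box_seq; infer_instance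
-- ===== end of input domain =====

-- B replaces A's O(step) loop by the closed form 0 / step / step+2 (faster, asymptotic).

-- ===== PORT A =====
-- literal port of A's while-loop: state (box, cycle); each pass does +3, check break, -1, check break
def box_seq_loop (step box cycle : Int) : Int :=
  if _h : cycle < step then
    let box1 := box + 3
    let cycle1 := cycle + 1
    if cycle1 = step then box1
    else
      let box2 := box1 - 1
      let cycle2 := cycle1 + 1
      if cycle2 = step then box2
      else box_seq_loop step box2 cycle2
  else box
termination_by (step - cycle).toNat
decreasing_by omega

def box_seq (step : Int) : Int := box_seq_loop step 0 0

-- ===== PORT B =====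
def box_seq_alt (step : Int) : Int :=
  if step ≤ 0 then 0
  else if PySem.Int.mod step 2 = 0 then step else step + 2

-- ===== PRECONDITION & SPEC =====
def Spec_box_seq (step : Int) (out : Int) : Prop := out = box_seq_alt step
instance (step : Int) (out : Int) : Decidable (Spec_box_seq step out) := by unfold Spec_box_seq; infer_instance

-- ===== CLAIM (what is proved, stated in full; the proofs are below) =====
def Claim_equal_box_seq : Prop := ∀ (step : Int), Dom_box_seq step → Spec_box_seq step (box_seq step)

-- ===== LEMMAS AND PROOFS =====

-- closed form of the remaining loop, as a function of d = step - cycle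
def box_seq_tail (d : Int) : Int :=
  if d ≤ 0 then 0 else if d % 2 = 0 then d else d + 2

theorem box_seq_tail_step (d : Int) (h : 3 ≤ d) :
    box_seq_tail d = box_seq_tail (d - 2) + 2 := by
  unfold box_seq_tail
  split_ifs <;> omega

theorem box_seq_loop_eq (step box cycle : Int) :
    box_seq_loop step box cycle = box + box_seq_tail (step - cycle) := by
  fun_induction box_seq_loop step box cycle with
  | case1 box cycle h box1 cycle1 h1 =>
      simp only [box_seq_tail]
      rw [show step - cycle = 1 by omega]
      norm_num
      omega
  | case2 box cycle h box1 cycle1 h1 box2 cycle2 h2 =>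
      simp only [box_seq_tail]
      rw [show step - cycle = 2 by omega]
      norm_num
      omega
  | case3 box cycle h box1 cycle1 h1 box2 cycle2 h2 ih =>
      rw [ih, show step - cycle2 = step - cycle - 2 by omega,
          box_seq_tail_step (step - cycle) (by omega)]
      omega
  | case4 box cycle h =>
      simp only [box_seq_tail]
      rw [if_pos (by omega)]
      ring

-- ===== VERDICT (by name: the statement is the Claim_ definition above) =====
theorem box_seq_spec : Claim_equal_box_seq := by
  intro step _
  unfold Spec_box_seq box_seq box_seq_alt
  rw [box_seq_loop_eq]
  rw [PySem.Int.mod_eq_emod_of_pos (by norm_num)]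
  simp only [box_seq_tail, sub_zero, zero_add]
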